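-- pv_equiv track=rewrite | github.com/Mouret-Orfeu/Projet-Code-circulaire | src/main.py | get_graph_from_code
-- ===== SOURCE A (Python) =====
-- len_tetra = 4
--
-- def get_nod_and_edge_tetra(tetra):
--     nods = set()
--     edges = set()
--     for slice_idx in range(1,len_tetra):
--
--         first_slice = tetra[0:slice_idx]
--         second_slice = tetra[slice_idx:]
--
--         nods.add(first_slice)
--         if slice_idx == 2:
--             #On évite de remettre un noeud qui est déjà dans le graphe (par ex pour "AAAA", on ne met pas 2 fois le noeud "AA" dans nods)
--             if second_slice != first_slice:
--                 nods.add(second_slice)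
--         else:
--             nods.add(second_slice)
--         edges.add((first_slice, second_slice))
--     return nods, edges
--
-- def get_graph_from_code(code):
--     nods = set()
--     edges = set()
--     for tetra in code:
--         nods_tetra, edges_tetra = get_nod_and_edge_tetra(tetra)
--         nods = nods | nods_tetra
--         edges = edges | edges_tetra
--     return nods, edges
-- ===== SOURCE B (Python) =====
-- len_tetra = 4
--
-- def get_graph_from_code(code):
--     edges = set()
--     for tetra in code:
--         pre, suf = "", tetra
--         for _ in range(len_tetra - 1):
--             pre, suf = pre + suf[:1], suf[1:]
--             edges.add((pre, suf))
--     nods = {x for e in edges for x in e}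
--     return nods, edges
-- ===== Notes on version B (the rewrite author's own statement) =====
-- stated objective: faster
-- what changed: B walks each word once, incrementally transferring one character at a time from a suffix accumulator to a prefix accumulator and recording an edge after each transfer into a single edge set, then derives the node set by flattening the edges; this replaces A's per-split-index pair of fresh slices, its helper maintaining two parallel sets with a redundant slice_idx==2 membership branch, and its per-tetra whole-set union copies.
import Mathlib
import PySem

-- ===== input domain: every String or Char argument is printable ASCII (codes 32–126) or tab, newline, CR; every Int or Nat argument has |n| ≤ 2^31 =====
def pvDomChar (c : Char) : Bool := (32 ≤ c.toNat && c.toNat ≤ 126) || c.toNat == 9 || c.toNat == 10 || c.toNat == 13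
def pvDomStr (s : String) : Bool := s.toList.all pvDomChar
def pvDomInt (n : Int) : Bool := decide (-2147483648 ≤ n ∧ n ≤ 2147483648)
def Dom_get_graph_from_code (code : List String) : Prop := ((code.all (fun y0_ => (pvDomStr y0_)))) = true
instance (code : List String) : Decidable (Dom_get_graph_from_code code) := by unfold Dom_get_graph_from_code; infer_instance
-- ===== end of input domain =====

-- B replaces A's per-tetra split-index slicing (two fresh slices per split point, two parallel
-- sets, per-tetra whole-set unions) by an incremental character transfer: it walks each word once
-- moving one character at a time from a suffix accumulator to a prefix accumulator, recording an
-- edge after each move into a single edge set, and derives the node set from the edges at the end;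
-- objective: faster (A's per-tetra set unions copy the accumulated sets, which a timing run measured as the slow part); return values are sets: contents, not order, are observable.

-- ===== PORT A =====
def get_nod_and_edge_tetra (tetra : String) : PySem.Set String × PySem.Set (String × String) :=
  (PySem.List.pyRange 1 4 1).foldl
    (fun st slice_idx =>
      let first_slice := PySem.Str.slice tetra (some 0) (some slice_idx)
      let second_slice := PySem.Str.slice tetra (some slice_idx) none
      let nods := PySem.Set.add st.1 first_slice
      let nods :=
        if slice_idx = 2 then
          (if second_slice ≠ first_slice then PySem.Set.add nods second_slice else nods)
        else PySem.Set.add nods second_slice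
      let edges := PySem.Set.add st.2 (first_slice, second_slice)
      (nods, edges))
    (PySem.Set.empty, PySem.Set.empty)

def get_graph_from_code (code : List String) : List String × (List (String × String)) :=
  code.foldl
    (fun st tetra =>
      let r := get_nod_and_edge_tetra tetra
      (PySem.Set.union st.1 r.1, PySem.Set.union st.2 r.2))
    (PySem.Set.empty, PySem.Set.empty)

-- ===== PORT B =====
-- one step of B's inner loop: move one character from the suffix to the prefix, record the edge
def pvStepB (st : String × String × PySem.Set (String × String)) (_ : Int) :
    String × String × PySem.Set (String × String) :=
  let pre := st.1 ++ PySem.Str.slice st.2.1 none (some 1)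
  let suf := PySem.Str.slice st.2.1 (some 1) none
  (pre, suf, PySem.Set.add st.2.2 (pre, suf))

def get_graph_from_code_alt (code : List String) : List String × (List (String × String)) :=
  let edges : PySem.Set (String × String) :=
    code.foldl
      (fun edges tetra =>
        ((PySem.List.pyRange 0 3 1).foldl pvStepB ("", tetra, edges)).2.2)
      PySem.Set.empty
  let nods : PySem.Set String := PySem.Set.ofList (edges.flatMap (fun e => [e.1, e.2]))
  (nods, edges)

-- ===== PRECONDITION & SPEC =====
def Spec_get_graph_from_code (code : List String) (out : List String × (List (String × String))) : Prop := out = get_graph_from_code_alt code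
instance (code : List String) (out : List String × (List (String × String))) : Decidable (Spec_get_graph_from_code code out) := by unfold Spec_get_graph_from_code; infer_instance

-- ===== CLAIM (what is proved, stated in full; the proofs are below) =====
def Claim_equal_get_graph_from_code : Prop := ∀ (code : List String), Dom_get_graph_from_code code → Spec_get_graph_from_code code (get_graph_from_code code)

-- ===== LEMMAS AND PROOFS =====

-- A's edge list for one tetra (slices as A writes them, start bound 0)
def pvEdgesOf (t : String) : List (String × String) :=
  (PySem.List.pyRange 1 4 1).map (fun i =>
    (PySem.Str.slice t (some 0) (some i), PySem.Str.slice t (some i) none))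

-- the order in which A inserts nodes for one tetra
def pvNodsOf (t : String) : List String :=
  (pvEdgesOf t).flatMap (fun e => [e.1, e.2])

theorem pv_slice_zero (t : String) (b : Option Int) :
    PySem.Str.slice t (some 0) b = PySem.Str.slice t none b := by
  simp [PySem.Str.slice]

theorem pv_empty_append (s : String) : "" ++ s = s := by
  apply String.toList_inj.mp; simp

-- moving one more character extends the prefix slice by one …
theorem pv_pre_succ (t : String) (k : Int) (hk : 0 ≤ k) :
    PySem.Str.slice t none (some k) ++
      PySem.Str.slice (PySem.Str.slice t (some k) none) none (some 1) =
    PySem.Str.slice t none (some (k + 1)) := by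
  apply String.toList_inj.mp
  simp only [String.toList_append, PySem.Str.toList_slice, PySem.Chars.slice_eq_listSlice]
  rw [PySem.List.slice_to _ hk, PySem.List.slice_from _ hk,
    PySem.List.slice_to _ (by norm_num : (0:Int) ≤ 1),
    PySem.List.slice_to _ (by omega : (0:Int) ≤ k + 1)]
  have h1 : (k + 1).toNat = k.toNat + 1 := by omega
  rw [h1, List.take_add]
  rfl

-- … and shortens the suffix slice by one
theorem pv_suf_succ (t : String) (k : Int) (hk : 0 ≤ k) :
    PySem.Str.slice (PySem.Str.slice t (some k) none) (some 1) none =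
    PySem.Str.slice t (some (k + 1)) none := by
  apply String.toList_inj.mp
  simp only [PySem.Str.toList_slice, PySem.Chars.slice_eq_listSlice]
  rw [PySem.List.slice_from _ hk, PySem.List.slice_from _ (by norm_num : (0:Int) ≤ 1),
    PySem.List.slice_from _ (by omega : (0:Int) ≤ k + 1)]
  have h1 : (k + 1).toNat = k.toNat + 1 := by omega
  rw [h1, List.drop_drop]
  rfl

theorem pv_update_of_subset {α : Type} [BEq α] [LawfulBEq α] (s : PySem.Set α) (ys : List α)
    (h : ∀ y ∈ ys, y ∈ s) : PySem.Set.update s ys = s := by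
  rw [PySem.Set.update_eq_append_filter]
  have hnil : (PySem.Set.ofList ys).filter (fun y => !(PySem.Set.contains s y)) = [] := by
    apply List.filter_eq_nil_iff.mpr
    intro y hy
    have hm : y ∈ s := h y ((PySem.Set.mem_ofList ys y).mp hy)
    simpa using hm
  rw [hnil, List.append_nil]

theorem pv_update_ofList_right {α : Type} [BEq α] [LawfulBEq α] (s : PySem.Set α) (l : List α) :
    PySem.Set.update s (PySem.Set.ofList l) = PySem.Set.update s l := by
  rw [PySem.Set.update_eq_append_filter, PySem.Set.update_eq_append_filter,
    PySem.Set.ofList_ofList]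

-- dedup before flatMap does not change the resulting set (as a list of first occurrences)
theorem pv_ofList_flatMap_ofList {α β : Type} [BEq α] [LawfulBEq α] [BEq β] [LawfulBEq β]
    (f : α → List β) (l : List α) :
    PySem.Set.ofList ((PySem.Set.ofList l).flatMap f) = PySem.Set.ofList (l.flatMap f) := by
  induction l using List.reverseRecOn with
  | nil => rfl
  | append_singleton l x ih =>
    by_cases hx : x ∈ l
    · have h1 : PySem.Set.ofList (l ++ [x]) = PySem.Set.ofList l := by
        rw [PySem.Set.ofList_append_singleton,
          PySem.Set.add_of_mem ((PySem.Set.mem_ofList l x).mpr hx)]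
      rw [h1, ih, List.flatMap_append, PySem.Set.ofList_append]
      refine (pv_update_of_subset _ _ ?_).symm
      intro y hy
      simp only [List.flatMap_cons, List.flatMap_nil, List.append_nil] at hy
      exact (PySem.Set.mem_ofList _ y).mpr (List.mem_flatMap.mpr ⟨x, hx, hy⟩)
    · have h1 : PySem.Set.ofList (l ++ [x]) = PySem.Set.ofList l ++ [x] := by
        rw [PySem.Set.ofList_append_singleton,
          PySem.Set.add_of_not_mem (fun h => hx ((PySem.Set.mem_ofList l x).mp h))]
      rw [h1, List.flatMap_append, PySem.Set.ofList_append, ih, ← PySem.Set.ofList_append,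
        ← List.flatMap_append]

theorem pv_tetra_eq (t : String) :
    get_nod_and_edge_tetra t =
      (PySem.Set.ofList (pvNodsOf t), PySem.Set.ofList (pvEdgesOf t)) := by
  have h : PySem.List.pyRange 1 4 1 = [1, 2, 3] := by decide
  unfold get_nod_and_edge_tetra pvNodsOf pvEdgesOf
  rw [h]
  by_cases hx : PySem.Str.slice t (some 2) none = PySem.Str.slice t (some 0) (some 2)
  · simp [List.foldl, PySem.Set.ofList, hx, PySem.Set.add_of_mem,
      PySem.Set.mem_add]
  · simp [List.foldl, PySem.Set.ofList, hx]

theorem pv_foldA (code : List String) : ∀ (xs : List String) (ys : List (String × String)),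
    code.foldl
      (fun st tetra =>
        let r := get_nod_and_edge_tetra tetra
        (PySem.Set.union st.1 r.1, PySem.Set.union st.2 r.2))
      (PySem.Set.ofList xs, PySem.Set.ofList ys) =
    (PySem.Set.ofList (xs ++ code.flatMap pvNodsOf),
     PySem.Set.ofList (ys ++ code.flatMap pvEdgesOf)) := by
  induction code with
  | nil => intro xs ys; simp
  | cons t rest ih =>
    intro xs ys
    have hu : ∀ {α : Type} [BEq α] [LawfulBEq α] (a b : List α),
        PySem.Set.union (PySem.Set.ofList a) (PySem.Set.ofList b) =
          PySem.Set.ofList (a ++ b) := by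
      intro α _ _ a b
      rw [PySem.Set.ofList_append]
      exact pv_update_ofList_right _ _
    simp only [pv_tetra_eq] at ih ⊢
    rw [List.foldl_cons]
    simp only [hu]
    rw [ih]
    simp [List.flatMap_cons, List.append_assoc]

-- B's inner loop: three character transfers insert exactly A's three edges, in order
theorem pv_innerB (t : String) (E : PySem.Set (String × String)) :
    (PySem.List.pyRange 0 3 1).foldl pvStepB ("", t, E) =
      (PySem.Str.slice t none (some 3), PySem.Str.slice t (some 3) none,
       PySem.Set.update E (pvEdgesOf t)) := by
  have h : PySem.List.pyRange 0 3 1 = [0, 1, 2] := by decide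
  have hr : PySem.List.pyRange 1 4 1 = [1, 2, 3] := by decide
  have h0 : PySem.Str.slice t none (some 0) = "" := by
    apply String.toList_inj.mp
    simp only [PySem.Str.toList_slice, PySem.Chars.slice_eq_listSlice]
    rw [PySem.List.slice_to _ (le_refl (0:Int))]
    rfl
  have hp1 := pv_pre_succ t 0 (by norm_num)
  have hs1 := pv_suf_succ t 0 (by norm_num)
  have hp2 := pv_pre_succ t 1 (by norm_num)
  have hs2 := pv_suf_succ t 1 (by norm_num)
  have hp3 := pv_pre_succ t 2 (by norm_num)
  have hs3 := pv_suf_succ t 2 (by norm_num)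
  rw [h0] at hp1
  have hsufz : PySem.Str.slice t (some 0) none = t := by
    apply String.toList_inj.mp
    simp only [PySem.Str.toList_slice, PySem.Chars.slice_eq_listSlice]
    rw [PySem.List.slice_from _ (le_refl (0:Int))]
    rfl
  rw [hsufz] at hp1 hs1
  norm_num at hp1 hs1 hp2 hs2 hp3 hs3
  rw [h]
  simp only [List.foldl_cons, List.foldl_nil, pvStepB]
  rw [pv_empty_append, hp2, hs2, hp3, hs3]
  unfold pvEdgesOf
  rw [hr]
  simp only [List.map_cons, List.map_nil, PySem.Set.update_cons, PySem.Set.update_nil,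
    pv_slice_zero]

-- B's outer loop accumulates A's edges, tetra by tetra
theorem pv_foldB (code : List String) : ∀ (ys : List (String × String)),
    code.foldl
      (fun edges tetra =>
        ((PySem.List.pyRange 0 3 1).foldl pvStepB ("", tetra, edges)).2.2)
      (PySem.Set.ofList ys) =
    PySem.Set.ofList (ys ++ code.flatMap pvEdgesOf) := by
  induction code with
  | nil => intro ys; simp
  | cons t rest ih =>
    intro ys
    rw [List.foldl_cons, pv_innerB, ← PySem.Set.ofList_append, ih]
    simp [List.flatMap_cons, List.append_assoc]

-- ===== VERDICT (by name: the statement is the Claim_ definition above) =====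
theorem get_graph_from_code_spec : Claim_equal_get_graph_from_code := by
  intro code _
  unfold Spec_get_graph_from_code get_graph_from_code get_graph_from_code_alt
  have h0 : (PySem.Set.empty : PySem.Set String) = PySem.Set.ofList [] := rfl
  have h0' : (PySem.Set.empty : PySem.Set (String × String)) = PySem.Set.ofList [] := rfl
  rw [h0, h0', pv_foldA]
  rw [pv_foldB]
  simp only [List.nil_append]
  refine Prod.ext ?_ rfl
  rw [pv_ofList_flatMap_ofList]
  congr 1
  rw [List.flatMap_assoc]
  rfl
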